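-- pv_equiv track=rewrite | github.com/Deathbytray17/Implementation-of-TBR-Analysis | TBR_Analysis.py | compute_varied
-- ===== SOURCE A (Python) =====
-- def compute_varied(dependencies, independent_vars):
--     """
--     Compute the set of variables that vary based on independent variables.
--     """
--     varied = set(independent_vars)
--     changed = True
--     while changed:
--         changed = False
--         for var, inputs in dependencies.items():
--             if var not in varied and any(inp in varied for inp in inputs):
--                 varied.add(var)
--                 changed = True
--     return varied
-- ===== SOURCE B (Python) =====
-- def compute_varied(dependencies, independent_vars):
--     """
--     Compute the set of variables that vary based on independent variables.
--
--     Single-pass worklist BFS over a reverse-adjacency index (input -> dependent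
--     variables) instead of repeated full scans of the dependency mapping.
--     """
--     reverse = {}
--     for var, inputs in dependencies.items():
--         for inp in inputs:
--             reverse.setdefault(inp, []).append(var)
--     varied = set(independent_vars)
--     queue = list(dict.fromkeys(independent_vars))
--     i = 0
--     while i < len(queue):
--         u = queue[i]
--         i += 1
--         for var in reverse.get(u, []):
--             if var not in varied:
--                 varied.add(var)
--                 queue.append(var)
--     return varied
-- ===== Notes on version B (the rewrite author's own statement) =====
-- stated objective: alternative
-- what changed: Replaces A's repeated full scans of the dependency mapping until a fixed point with a worklist BFS over a reverse-adjacency index (input -> dependent variables) built once, propagating variedness from each newly varied variable to its dependents.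
import Mathlib
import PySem

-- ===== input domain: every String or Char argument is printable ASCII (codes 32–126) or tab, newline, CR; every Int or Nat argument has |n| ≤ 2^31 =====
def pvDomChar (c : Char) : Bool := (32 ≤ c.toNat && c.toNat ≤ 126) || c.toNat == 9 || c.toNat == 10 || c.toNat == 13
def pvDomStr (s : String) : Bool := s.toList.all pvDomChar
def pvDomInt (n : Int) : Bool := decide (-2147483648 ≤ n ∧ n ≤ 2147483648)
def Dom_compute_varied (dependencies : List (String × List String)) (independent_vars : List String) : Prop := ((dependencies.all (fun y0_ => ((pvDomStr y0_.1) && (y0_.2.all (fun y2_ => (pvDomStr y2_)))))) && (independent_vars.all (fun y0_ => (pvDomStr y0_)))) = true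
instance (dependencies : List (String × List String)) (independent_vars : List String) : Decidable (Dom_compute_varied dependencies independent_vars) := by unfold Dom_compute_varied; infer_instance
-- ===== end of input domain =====

-- B replaces A's repeated full scans of the dependency mapping (fixed-point passes) by a
-- single-pass worklist BFS over a reverse-adjacency index built once; return value only.
-- Both Pythons return a SET, whose iteration order is not modelled (PYSEM): each port
-- returns that set's canonical element list (sorted), so the ports' values are comparable.

-- ===== PORT A =====
-- loop body of A's inner 'for var, inputs in dependencies.items()'
def stepA (s : PySem.Set String × Bool) (e : String × List String) : PySem.Set String × Bool :=
  if !(PySem.Set.contains s.1 e.1) && e.2.any (fun inp => PySem.Set.contains s.1 inp) then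
    (PySem.Set.add s.1 e.1, true)
  else s

-- one 'for' pass of A over all dependency items
def passA (deps : List (String × List String)) (s : PySem.Set String × Bool) : PySem.Set String × Bool :=
  deps.foldl stepA s

-- A's 'while changed' loop; fuel = deps.length + 1 passes makes it total (each productive
-- pass adds at least one dependency key to varied, so at most deps.length + 1 passes run)
def loopA (deps : List (String × List String)) : Nat → PySem.Set String → PySem.Set String
  | 0, v => v
  | f + 1, v =>
    let r := passA deps (v, false)
    if r.2 then loopA deps f r.1 else r.1

def compute_varied (dependencies : List (String × List String)) (independent_vars : List String) : List String :=
  -- the Python returns the set 'varied'; its canonical element list is returned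
  PySem.List.sorted (loopA dependencies (dependencies.length + 1) (PySem.Set.ofList independent_vars)) (fun x => x) false

-- ===== PORT B =====
-- 'reverse.setdefault(inp, []).append(var)'
def revStep (var : String) (d : PySem.Dict String (List String)) (inp : String) : PySem.Dict String (List String) :=
  d.modify inp [] (fun l => l ++ [var])

-- 'for var, inputs in dependencies.items(): for inp in inputs: …'
def buildRev (deps : List (String × List String)) : PySem.Dict String (List String) :=
  deps.foldl (fun d e => e.2.foldl (revStep e.1) d) PySem.Dict.empty

-- body of 'for var in reverse.get(u, []): …'; state = (varied, queue not yet processed)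
def innerFold (l : List String) (s : PySem.Set String × List String) : PySem.Set String × List String :=
  l.foldl (fun s var => if PySem.Set.contains s.1 var then s else (PySem.Set.add s.1 var, s.2 ++ [var])) s

-- B's 'while i < len(queue)' loop (front of the queue = queue[i]); fuel bounds the number
-- of iterations: at most len(independent_vars) + len(dependencies) elements are ever enqueued
def bfsLoop (rev : PySem.Dict String (List String)) : Nat → PySem.Set String × List String → PySem.Set String
  | 0, s => s.1
  | f + 1, s =>
    match s.2 with
    | [] => s.1
    | u :: rest => bfsLoop rev f (innerFold (rev.getD u []) (s.1, rest))

def compute_varied_alt (dependencies : List (String × List String)) (independent_vars : List String) : List String :=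
  -- the Python returns the set 'varied'; its canonical element list is returned
  PySem.List.sorted
    (bfsLoop (buildRev dependencies) (independent_vars.length + dependencies.length + 1)
      (PySem.Set.ofList independent_vars, PySem.List.dedup independent_vars))
    (fun x => x) false

-- ===== PRECONDITION & SPEC =====
def Spec_compute_varied (dependencies : List (String × List String)) (independent_vars : List String) (out : List String) : Prop := out = compute_varied_alt dependencies independent_vars
instance (dependencies : List (String × List String)) (independent_vars : List String) (out : List String) : Decidable (Spec_compute_varied dependencies independent_vars out) := by unfold Spec_compute_varied; infer_instance

-- ===== CLAIM (what is proved, stated in full; the proofs are below) =====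
def Claim_equal_compute_varied : Prop := ∀ (dependencies : List (String × List String)) (independent_vars : List String), Dom_compute_varied dependencies independent_vars → Spec_compute_varied dependencies independent_vars (compute_varied dependencies independent_vars)

-- ===== LEMMAS AND PROOFS =====

-- the closure both programs compute: reachable from the independents along dependency edges
inductive Reach (deps : List (String × List String)) (indep : List String) : String → Prop
  | base (x : String) : x ∈ indep → Reach deps indep x
  | step (e : String × List String) (u : String) :
      e ∈ deps → u ∈ e.2 → Reach deps indep u → Reach deps indep e.1

-- remaining capacity: dependency keys not yet in v
def capa (deps : List (String × List String)) (v : List String) : Nat :=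
  (deps.map Prod.fst).countP (fun k => !v.contains k)

theorem countP_strict {α : Type} (l : List α) (p q : α → Bool)
    (himp : ∀ a, q a = true → p a = true) (x : α) (hx : x ∈ l)
    (hp : p x = true) (hq : q x = false) : l.countP q < l.countP p := by
  induction l with
  | nil => cases hx
  | cons a t ih =>
    rcases List.mem_cons.mp hx with rfl | hx
    · simp [hp, hq]
      exact List.countP_mono_left (fun a _ h => himp a h)
    · have := ih hx
      by_cases hqa : q a = true
      · simp [hqa, himp a hqa]; omega
      · simp [hqa]; rw [List.countP_cons]; split <;> omega

theorem capa_mono (deps : List (String × List String)) (v w : List String)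
    (h : ∀ x, x ∈ v → x ∈ w) : capa deps w ≤ capa deps v := by
  unfold capa
  refine List.countP_mono_left (fun a _ ha => ?_)
  simp at ha ⊢
  exact fun hv => ha (h a hv)

theorem capa_add_lt (deps : List (String × List String)) (v : List String) (x : String)
    (hk : x ∈ deps.map Prod.fst) (hx : x ∉ v) :
    capa deps (PySem.Set.add v x) < capa deps v := by
  unfold capa
  refine countP_strict _ _ _ (fun a ha => ?_) x hk (by simp [hx]) (by simp [PySem.Set.mem_add])
  simp [PySem.Set.mem_add] at ha ⊢
  exact ha.1

-- ===== A-side =====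
theorem passA_mono :
    ∀ (l : List (String × List String)) (s : PySem.Set String × Bool) (x : String),
      x ∈ s.1 → x ∈ (l.foldl stepA s).1 := by
  intro l
  induction l with
  | nil => intro s x hx; exact hx
  | cons e t ih =>
    intro s x hx
    refine ih (stepA s e) x ?_
    unfold stepA
    split
    · simp [PySem.Set.mem_add]; exact Or.inl hx
    · exact hx

theorem passA_nodup (l : List (String × List String)) : ∀ (s : PySem.Set String × Bool),
    s.1.Nodup → (l.foldl stepA s).1.Nodup := by
  induction l with
  | nil => intro s h; exact h
  | cons e t ih =>
    intro s h
    refine ih (stepA s e) ?_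
    unfold stepA
    split
    · exact PySem.Set.nodup_add _ _ h
    · exact h

theorem passA_sound (deps : List (String × List String)) (indep : List String) :
    ∀ (l : List (String × List String)), (∀ e, e ∈ l → e ∈ deps) →
      ∀ (s : PySem.Set String × Bool), (∀ x, x ∈ s.1 → Reach deps indep x) →
      ∀ x, x ∈ (l.foldl stepA s).1 → Reach deps indep x := by
  intro l
  induction l with
  | nil => intro _ s hs x hx; exact hs x hx
  | cons e t ih =>
    intro hl s hs
    refine ih (fun e' he' => hl e' (List.mem_cons_of_mem _ he')) (stepA s e) ?_
    intro x hx
    unfold stepA at hx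
    split at hx
    · rename_i hcond
      rcases (PySem.Set.mem_add _ _ _).mp hx with hx | rfl
      · exact hs x hx
      · simp at hcond
        obtain ⟨-, u, hu, huv⟩ := hcond
        exact Reach.step e u (hl e (List.mem_cons_self ..)) hu (hs u huv)
    · exact hs x hx

theorem passA_flag_mono : ∀ (l : List (String × List String)) (v : PySem.Set String),
    (l.foldl stepA (v, true)).2 = true := by
  intro l
  induction l with
  | nil => intro v; rfl
  | cons e t ih =>
    intro v
    show (t.foldl stepA (stepA (v, true) e)).2 = true
    unfold stepA
    split
    · exact ih _
    · exact ih v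

theorem passA_stable : ∀ (l : List (String × List String)) (v : PySem.Set String),
    (l.foldl stepA (v, false)).2 = false →
    (l.foldl stepA (v, false)).1 = v ∧
      (∀ e, e ∈ l → (∃ u, u ∈ e.2 ∧ u ∈ v) → e.1 ∈ v) := by
  intro l
  induction l with
  | nil => intro v _; exact ⟨rfl, by simp⟩
  | cons e t ih =>
    intro v h
    rw [List.foldl_cons] at h ⊢
    by_cases hc : (!(PySem.Set.contains v e.1) && e.2.any (fun inp => PySem.Set.contains v inp)) = true
    · exfalso
      have hs : stepA (v, false) e = (PySem.Set.add v e.1, true) := by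
        unfold stepA; rw [if_pos hc]
      rw [show t.foldl stepA (stepA (v, false) e) = t.foldl stepA (PySem.Set.add v e.1, true) by rw [hs]] at h
      rw [passA_flag_mono t _] at h
      cases h
    · have hs : stepA (v, false) e = (v, false) := by
        unfold stepA; rw [if_neg hc]
      rw [show t.foldl stepA (stepA (v, false) e) = t.foldl stepA (v, false) by rw [hs]] at h ⊢
      obtain ⟨h1, h2⟩ := ih v h
      refine ⟨h1, fun e' he' hu => ?_⟩
      rcases List.mem_cons.mp he' with rfl | he'
      · simp at hc
        by_contra hne
        obtain ⟨u, hu1, hu2⟩ := hu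
        exact hc hne u hu1 hu2
      · exact h2 e' he' hu

theorem passA_progress (deps : List (String × List String)) :
    ∀ (l : List (String × List String)), (∀ e, e ∈ l → e ∈ deps) →
    ∀ (v : PySem.Set String), (l.foldl stepA (v, false)).2 = true →
      capa deps (l.foldl stepA (v, false)).1 < capa deps v := by
  intro l
  induction l with
  | nil => intro _ v h; cases h
  | cons e t ih =>
    intro hl v h
    rw [List.foldl_cons] at h ⊢
    by_cases hc : (!(PySem.Set.contains v e.1) && e.2.any (fun inp => PySem.Set.contains v inp)) = true
    · have hs : stepA (v, false) e = (PySem.Set.add v e.1, true) := by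
        unfold stepA; rw [if_pos hc]
      rw [hs] at h ⊢
      have h1 : capa deps (PySem.Set.add v e.1) < capa deps v := by
        refine capa_add_lt deps v e.1 (List.mem_map.mpr ⟨e, hl e (List.mem_cons_self ..), rfl⟩) ?_
        simp at hc
        exact hc.1
      have h2 : capa deps (t.foldl stepA (PySem.Set.add v e.1, true)).1 ≤ capa deps (PySem.Set.add v e.1) := by
        exact capa_mono deps _ _ (fun x hx => passA_mono t _ x hx)
      omega
    · have hs : stepA (v, false) e = (v, false) := by
        unfold stepA; rw [if_neg hc]
      rw [hs] at h ⊢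
      exact ih (fun e' he' => hl e' (List.mem_cons_of_mem _ he')) v h

theorem loopA_spec (deps : List (String × List String)) (indep : List String) :
    ∀ (f : Nat) (v : PySem.Set String), v.Nodup → (∀ x, x ∈ v → Reach deps indep x) →
      capa deps v < f →
      (∀ x, x ∈ v → x ∈ loopA deps f v) ∧
      (∀ x, x ∈ loopA deps f v → Reach deps indep x) ∧
      (∀ e, e ∈ deps → (∃ u, u ∈ e.2 ∧ u ∈ loopA deps f v) → e.1 ∈ loopA deps f v) ∧
      (loopA deps f v).Nodup := by
  intro f
  induction f with
  | zero => intro v _ _ h; omega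
  | succ f ih =>
    intro v hnd hsound hcapa
    show _ ∧ _
    rw [show loopA deps (f+1) v = (if (passA deps (v, false)).2 then loopA deps f (passA deps (v, false)).1 else (passA deps (v, false)).1) from rfl]
    by_cases hflag : (passA deps (v, false)).2 = true
    · rw [if_pos hflag]
      have hnd' := passA_nodup deps (v, false) hnd
      have hsound' := passA_sound deps indep deps (fun _ h => h) (v, false) hsound
      have hcapa' : capa deps (passA deps (v, false)).1 < f := by
        have := passA_progress deps deps (fun _ h => h) v hflag
        unfold passA at *
        omega
      obtain ⟨m, s, c, n⟩ := ih (passA deps (v, false)).1 hnd' hsound' hcapa'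
      exact ⟨fun x hx => m x (passA_mono deps (v, false) x hx), s, c, n⟩
    · rw [if_neg hflag]
      obtain ⟨heq, hcl⟩ := passA_stable deps v (by simpa using hflag)
      unfold passA
      rw [heq]
      exact ⟨fun x hx => hx, hsound, hcl, hnd⟩

-- ===== B-side =====
theorem revGetD_inner (var : String) :
    ∀ (ins : List String) (d : PySem.Dict String (List String)) (u : String),
      (ins.foldl (revStep var) d).getD u [] =
        d.getD u [] ++ (ins.filter (fun i => i == u)).map (fun _ => var) := by
  intro ins
  induction ins with
  | nil => intro d u; simp
  | cons i t ih =>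
    intro d u
    rw [List.foldl_cons, ih]
    unfold revStep
    rw [PySem.Dict.getD_modify]
    by_cases h : u = i
    · subst h; simp
    · simp [h, Ne.symm h]

theorem revGetD_outer :
    ∀ (l : List (String × List String)) (d : PySem.Dict String (List String)) (u : String),
      (l.foldl (fun d e => e.2.foldl (revStep e.1) d) d).getD u [] =
        d.getD u [] ++ l.flatMap (fun e => (e.2.filter (fun i => i == u)).map (fun _ => e.1)) := by
  intro l
  induction l with
  | nil => intro d u; simp
  | cons e t ih =>
    intro d u
    rw [List.foldl_cons, ih, revGetD_inner]
    simp

theorem revGetD (deps : List (String × List String)) (u x : String) :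
    x ∈ (buildRev deps).getD u [] ↔ ∃ e, e ∈ deps ∧ x = e.1 ∧ u ∈ e.2 := by
  unfold buildRev
  rw [revGetD_outer]
  simp [List.mem_flatMap]

theorem innerFold_mem (l : List String) :
    ∀ (s : PySem.Set String × List String) (x : String),
      x ∈ (innerFold l s).1 ↔ x ∈ s.1 ∨ x ∈ l := by
  induction l with
  | nil => intro s x; simp [innerFold]
  | cons a t ih =>
    intro s x
    unfold innerFold at ih ⊢
    rw [List.foldl_cons]
    by_cases h : PySem.Set.contains s.1 a = true
    · rw [if_pos h, ih]
      simp at h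
      constructor
      · rintro (hx | hx)
        · exact Or.inl hx
        · exact Or.inr (List.mem_cons_of_mem _ hx)
      · rintro (hx | hx)
        · exact Or.inl hx
        · rcases List.mem_cons.mp hx with rfl | hx
          · exact Or.inl h
          · exact Or.inr hx
    · rw [if_neg h, ih]
      simp [PySem.Set.mem_add]
      tauto

theorem innerFold_queue (l : List String) :
    ∀ (s : PySem.Set String × List String) (x : String),
      x ∈ (innerFold l s).2 → x ∈ s.2 ∨ x ∈ l := by
  induction l with
  | nil => intro s x h; exact Or.inl h
  | cons a t ih =>
    intro s x h
    unfold innerFold at ih h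
    rw [List.foldl_cons] at h
    by_cases hc : PySem.Set.contains s.1 a = true
    · rw [if_pos hc] at h
      rcases ih s x h with h | h
      · exact Or.inl h
      · exact Or.inr (List.mem_cons_of_mem _ h)
    · rw [if_neg hc] at h
      rcases ih _ x h with h | h
      · rcases List.mem_append.mp h with h | h
        · exact Or.inl h
        · simp at h; subst h; exact Or.inr (List.mem_cons_self ..)
      · exact Or.inr (List.mem_cons_of_mem _ h)

theorem innerFold_queue_sub (l : List String) :
    ∀ (s : PySem.Set String × List String) (x : String),
      x ∈ s.2 → x ∈ (innerFold l s).2 := by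
  induction l with
  | nil => intro s x h; exact h
  | cons a t ih =>
    intro s x h
    unfold innerFold at ih ⊢
    rw [List.foldl_cons]
    by_cases hc : PySem.Set.contains s.1 a = true
    · rw [if_pos hc]; exact ih s x h
    · rw [if_neg hc]
      exact ih _ x (List.mem_append.mpr (Or.inl h))

theorem innerFold_queue_mem (l : List String) :
    ∀ (s : PySem.Set String × List String) (x : String),
      x ∈ l → x ∉ s.1 → x ∈ (innerFold l s).2 := by
  induction l with
  | nil => intro s x h; cases h
  | cons a t ih =>
    intro s x h hx
    unfold innerFold at ih ⊢
    rw [List.foldl_cons]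
    by_cases hc : PySem.Set.contains s.1 a = true
    · rw [if_pos hc]
      rcases List.mem_cons.mp h with rfl | h
      · simp at hc; exact absurd hc hx
      · exact ih s x h hx
    · rw [if_neg hc]
      rcases List.mem_cons.mp h with rfl | h
      · exact innerFold_queue_sub t _ x (by simp)
      · by_cases hxa : x ∈ PySem.Set.add s.1 a
        · rcases (PySem.Set.mem_add _ _ _).mp hxa with hmem | rfl
          · exact absurd hmem hx
          · exact innerFold_queue_sub t _ x (by simp)
        · exact ih _ x h hxa

theorem innerFold_nodup (l : List String) :
    ∀ (s : PySem.Set String × List String), s.1.Nodup → (innerFold l s).1.Nodup := by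
  induction l with
  | nil => intro s h; exact h
  | cons a t ih =>
    intro s h
    unfold innerFold at ih ⊢
    rw [List.foldl_cons]
    by_cases hc : PySem.Set.contains s.1 a = true
    · rw [if_pos hc]; exact ih s h
    · rw [if_neg hc]; exact ih _ (PySem.Set.nodup_add _ _ h)

theorem innerFold_phi (deps : List (String × List String)) :
    ∀ (l : List String), (∀ x, x ∈ l → x ∈ deps.map Prod.fst) →
    ∀ (s : PySem.Set String × List String),
      (innerFold l s).2.length + capa deps (innerFold l s).1 ≤ s.2.length + capa deps s.1 := by
  intro l
  induction l with
  | nil => intro _ s; simp [innerFold]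
  | cons a t ih =>
    intro hl s
    unfold innerFold at ih ⊢
    rw [List.foldl_cons]
    by_cases hc : PySem.Set.contains s.1 a = true
    · rw [if_pos hc]
      exact ih (fun x hx => hl x (List.mem_cons_of_mem _ hx)) s
    · rw [if_neg hc]
      have h1 := ih (fun x hx => hl x (List.mem_cons_of_mem _ hx)) (PySem.Set.add s.1 a, s.2 ++ [a])
      have h2 : capa deps (PySem.Set.add s.1 a) < capa deps s.1 := by
        refine capa_add_lt deps s.1 a (hl a (List.mem_cons_self ..)) ?_
        simpa using hc
      simp only [List.length_append, List.length_cons, List.length_nil] at h1 ⊢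
      omega

theorem bfs_sound (deps : List (String × List String)) (indep : List String) :
    ∀ (f : Nat) (s : PySem.Set String × List String),
      (∀ x, x ∈ s.1 → Reach deps indep x) → (∀ x, x ∈ s.2 → x ∈ s.1) →
      ∀ x, x ∈ bfsLoop (buildRev deps) f s → Reach deps indep x := by
  intro f
  induction f with
  | zero => intro s hv _ x hx; exact hv x hx
  | succ f ih =>
    rintro ⟨v, q⟩ hv hq x hx
    cases q with
    | nil => exact hv x hx
    | cons u rest =>
      rw [show bfsLoop (buildRev deps) (f+1) (v, u :: rest)
            = bfsLoop (buildRev deps) f (innerFold ((buildRev deps).getD u []) (v, rest)) from rfl] at hx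
      have hu : Reach deps indep u := hv u (hq u (List.mem_cons_self ..))
      have hv' : ∀ y, y ∈ (innerFold ((buildRev deps).getD u []) (v, rest)).1 → Reach deps indep y := by
        intro y hy
        rcases (innerFold_mem _ _ _).mp hy with hy | hy
        · exact hv y hy
        · obtain ⟨e, he, rfl, hue⟩ := (revGetD deps u y).mp hy
          exact Reach.step e u he hue hu
      refine ih _ hv' ?_ x hx
      intro y hy
      rcases innerFold_queue _ _ _ hy with hy' | hy'
      · exact (innerFold_mem _ _ _).mpr (Or.inl (hq y (List.mem_cons_of_mem _ hy')))
      · exact (innerFold_mem _ _ _).mpr (Or.inr hy')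

theorem bfs_closed (deps : List (String × List String)) :
    ∀ (f : Nat) (s : PySem.Set String × List String), s.1.Nodup →
      (∀ x, x ∈ s.2 → x ∈ s.1) →
      (∀ u, u ∈ s.1 → u ∈ s.2 ∨ ∀ x, x ∈ (buildRev deps).getD u [] → x ∈ s.1) →
      s.2.length + capa deps s.1 < f →
      (∀ x, x ∈ s.1 → x ∈ bfsLoop (buildRev deps) f s) ∧
      (∀ u, u ∈ bfsLoop (buildRev deps) f s →
        ∀ x, x ∈ (buildRev deps).getD u [] → x ∈ bfsLoop (buildRev deps) f s) ∧
      (bfsLoop (buildRev deps) f s).Nodup := by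
  intro f
  induction f with
  | zero => intro s _ _ _ h; omega
  | succ f ih =>
    rintro ⟨v, q⟩ hnd hq hI hphi
    cases q with
    | nil =>
      refine ⟨fun x hx => hx, fun u hu x hx => ?_, hnd⟩
      rcases hI u hu with h | h
      · cases h
      · exact h x hx
    | cons u rest =>
      rw [show bfsLoop (buildRev deps) (f+1) (v, u :: rest)
            = bfsLoop (buildRev deps) f (innerFold ((buildRev deps).getD u []) (v, rest)) from rfl]
      have hlk : ∀ x, x ∈ (buildRev deps).getD u [] → x ∈ deps.map Prod.fst := by
        intro x hx
        obtain ⟨e, he, rfl, -⟩ := (revGetD deps u x).mp hx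
        exact List.mem_map.mpr ⟨e, he, rfl⟩
      have hnd' := innerFold_nodup ((buildRev deps).getD u []) (v, rest) hnd
      have hq' : ∀ x, x ∈ (innerFold ((buildRev deps).getD u []) (v, rest)).2 →
          x ∈ (innerFold ((buildRev deps).getD u []) (v, rest)).1 := by
        intro y hy
        rcases innerFold_queue _ _ _ hy with hy' | hy'
        · exact (innerFold_mem _ _ _).mpr (Or.inl (hq y (List.mem_cons_of_mem _ hy')))
        · exact (innerFold_mem _ _ _).mpr (Or.inr hy')
      have hI' : ∀ w, w ∈ (innerFold ((buildRev deps).getD u []) (v, rest)).1 →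
          w ∈ (innerFold ((buildRev deps).getD u []) (v, rest)).2 ∨
          ∀ x, x ∈ (buildRev deps).getD w [] → x ∈ (innerFold ((buildRev deps).getD u []) (v, rest)).1 := by
        intro w hw
        by_cases hwu : w = u
        · subst hwu
          exact Or.inr (fun x hx => (innerFold_mem _ _ _).mpr (Or.inr hx))
        · by_cases hwv : w ∈ v
          · rcases hI w hwv with h | h
            · rcases List.mem_cons.mp h with rfl | h
              · exact absurd rfl hwu
              · exact Or.inl (innerFold_queue_sub _ _ _ h)
            · exact Or.inr (fun x hx => (innerFold_mem _ _ _).mpr (Or.inl (h x hx)))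
          · rcases (innerFold_mem _ _ _).mp hw with h | h
            · exact absurd h hwv
            · exact Or.inl (innerFold_queue_mem _ _ _ h hwv)
      have hphi' : (innerFold ((buildRev deps).getD u []) (v, rest)).2.length +
          capa deps (innerFold ((buildRev deps).getD u []) (v, rest)).1 < f := by
        have h3 : (innerFold ((buildRev deps).getD u []) (v, rest)).2.length +
            capa deps (innerFold ((buildRev deps).getD u []) (v, rest)).1 ≤
            rest.length + capa deps v := innerFold_phi deps ((buildRev deps).getD u []) hlk (v, rest)
        simp only [List.length_cons] at hphi
        omega
      obtain ⟨hsub, hcl, hnd''⟩ := ih _ hnd' hq' hI' hphi'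
      exact ⟨fun x hx => hsub x ((innerFold_mem _ _ _).mpr (Or.inl hx)), hcl, hnd''⟩

-- ===== assembly =====
theorem sorted_ext (l₁ l₂ : List String)
    (h₁ : l₁.Pairwise (· < ·)) (h₂ : l₂.Pairwise (· < ·))
    (h : ∀ x, x ∈ l₁ ↔ x ∈ l₂) : l₁ = l₂ := by
  induction l₁ generalizing l₂ with
  | nil =>
    cases l₂ with
    | nil => rfl
    | cons b t₂ => exact absurd ((h b).mpr (List.mem_cons_self ..)) (List.not_mem_nil)
  | cons a t₁ ih =>
    cases l₂ with
    | nil => exact absurd ((h a).mp (List.mem_cons_self ..)) (List.not_mem_nil)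
    | cons b t₂ =>
      obtain ⟨ha1, ha2⟩ := List.pairwise_cons.mp h₁
      obtain ⟨hb1, hb2⟩ := List.pairwise_cons.mp h₂
      have hab : a = b := by
        rcases List.mem_cons.mp ((h a).mp (List.mem_cons_self ..)) with h' | h'
        · exact h'
        · rcases List.mem_cons.mp ((h b).mpr (List.mem_cons_self ..)) with h'' | h''
          · exact h''.symm
          · exact absurd (lt_trans (hb1 a h') (ha1 b h'')) (lt_irrefl b)
      subst hab
      have ht : ∀ x, x ∈ t₁ ↔ x ∈ t₂ := by
        intro x
        constructor
        · intro hx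
          rcases List.mem_cons.mp ((h x).mp (List.mem_cons_of_mem _ hx)) with rfl | h'
          · exact absurd (ha1 x hx) (lt_irrefl x)
          · exact h'
        · intro hx
          rcases List.mem_cons.mp ((h x).mpr (List.mem_cons_of_mem _ hx)) with rfl | h'
          · exact absurd (hb1 x hx) (lt_irrefl x)
          · exact h'
      rw [ih t₂ ha2 hb2 ht]

theorem core_ext (xs ys : List String) (hx : xs.Nodup) (hy : ys.Nodup)
    (h : ∀ x, x ∈ xs ↔ x ∈ ys) :
    PySem.List.sorted xs (fun x => x) false = PySem.List.sorted ys (fun x => x) false := by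
  have pl : ∀ (zs : List String), zs.Nodup →
      (PySem.List.sorted zs (fun x => x) false).Pairwise (· < ·) := by
    intro zs hz
    have h1 := PySem.List.sorted_pairwise zs (fun x => x)
    have h2 : (PySem.List.sorted zs (fun x => x) false).Nodup :=
      (PySem.List.sorted_perm zs (fun x => x) false).nodup_iff.mpr hz
    exact (h1.and h2).imp (fun hab => lt_of_le_of_ne hab.1 hab.2)
  refine sorted_ext _ _ (pl xs hx) (pl ys hy) (fun x => ?_)
  rw [PySem.List.mem_sorted, PySem.List.mem_sorted]
  exact h x

theorem capa_le (deps : List (String × List String)) (v : List String) :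
    capa deps v ≤ deps.length := by
  calc capa deps v ≤ (deps.map Prod.fst).length := List.countP_le_length
    _ = deps.length := List.length_map ..

theorem coreA_mem (deps : List (String × List String)) (indep : List String) :
    ∀ x, x ∈ loopA deps (deps.length + 1) (PySem.Set.ofList indep) ↔ Reach deps indep x := by
  have hc : capa deps (PySem.Set.ofList indep) < deps.length + 1 :=
    Nat.lt_succ_of_le (capa_le deps _)
  obtain ⟨hmono, hsound, hclosed, -⟩ := loopA_spec deps indep (deps.length + 1)
    (PySem.Set.ofList indep) (PySem.Set.nodup_ofList indep)
    (fun x hx => Reach.base x ((PySem.Set.mem_ofList _ _).mp hx)) hc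
  intro x
  constructor
  · exact hsound x
  · intro hr
    induction hr with
    | base y hy => exact hmono y ((PySem.Set.mem_ofList _ _).mpr hy)
    | step e u he hu _ ihr => exact hclosed e he ⟨u, hu, ihr⟩

theorem coreA_nodup (deps : List (String × List String)) (indep : List String) :
    (loopA deps (deps.length + 1) (PySem.Set.ofList indep)).Nodup := by
  have hc : capa deps (PySem.Set.ofList indep) < deps.length + 1 :=
    Nat.lt_succ_of_le (capa_le deps _)
  exact (loopA_spec deps indep (deps.length + 1) (PySem.Set.ofList indep)
    (PySem.Set.nodup_ofList indep)
    (fun x hx => Reach.base x ((PySem.Set.mem_ofList _ _).mp hx)) hc).2.2.2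

theorem coreB_mem (deps : List (String × List String)) (indep : List String) :
    ∀ x, x ∈ bfsLoop (buildRev deps) (indep.length + deps.length + 1)
      (PySem.Set.ofList indep, PySem.List.dedup indep) ↔ Reach deps indep x := by
  have hphi : (PySem.List.dedup indep).length + capa deps (PySem.Set.ofList indep) <
      indep.length + deps.length + 1 := by
    have h1 := capa_le deps (PySem.Set.ofList indep)
    have h2 : (PySem.List.dedup indep).length ≤ indep.length := by
      rw [PySem.List.dedup_eq_ofList]
      exact PySem.Set.length_ofList_le indep
    omega
  obtain ⟨hsub, hcl, -⟩ := bfs_closed deps (indep.length + deps.length + 1)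
    (PySem.Set.ofList indep, PySem.List.dedup indep) (PySem.Set.nodup_ofList indep)
    (fun x hx => PySem.List.dedup_eq_ofList indep ▸ hx)
    (fun u hu => Or.inl ((PySem.List.dedup_eq_ofList indep).symm ▸ hu)) hphi
  intro x
  constructor
  · exact bfs_sound deps indep _ _
      (fun y hy => Reach.base y ((PySem.Set.mem_ofList _ _).mp hy))
      (fun y hy => PySem.List.dedup_eq_ofList indep ▸ hy) x
  · intro hr
    induction hr with
    | base y hy => exact hsub y ((PySem.Set.mem_ofList _ _).mpr hy)
    | step e u he hu _ ihr =>
      exact hcl u ihr e.1 ((revGetD deps u e.1).mpr ⟨e, he, rfl, hu⟩)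

theorem coreB_nodup (deps : List (String × List String)) (indep : List String) :
    (bfsLoop (buildRev deps) (indep.length + deps.length + 1)
      (PySem.Set.ofList indep, PySem.List.dedup indep)).Nodup := by
  have hphi : (PySem.List.dedup indep).length + capa deps (PySem.Set.ofList indep) <
      indep.length + deps.length + 1 := by
    have h1 := capa_le deps (PySem.Set.ofList indep)
    have h2 : (PySem.List.dedup indep).length ≤ indep.length := by
      rw [PySem.List.dedup_eq_ofList]
      exact PySem.Set.length_ofList_le indep
    omega
  exact (bfs_closed deps (indep.length + deps.length + 1)
    (PySem.Set.ofList indep, PySem.List.dedup indep) (PySem.Set.nodup_ofList indep)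
    (fun x hx => PySem.List.dedup_eq_ofList indep ▸ hx)
    (fun u hu => Or.inl ((PySem.List.dedup_eq_ofList indep).symm ▸ hu)) hphi).2.2

-- ===== VERDICT (by name: the statement is the Claim_ definition above) =====
theorem compute_varied_spec : Claim_equal_compute_varied := by
  intro dependencies independent_vars _hdom
  unfold Spec_compute_varied compute_varied compute_varied_alt
  refine core_ext _ _ (coreA_nodup dependencies independent_vars)
    (coreB_nodup dependencies independent_vars) (fun x => ?_)
  rw [coreA_mem dependencies independent_vars x, coreB_mem dependencies independent_vars x]
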